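-- pv_equiv track=rewrite | github.com/Harzh-k/pdf_to_excel_data_extraction | src/extractor.py | _expand_index_table
-- ===== SOURCE A (Python) =====
-- def _expand_index_table(table_data):
--     """
--     Convert a 2-row pdfplumber index table (with multi-line cells) into
--     individual rows: one row per form entry.
--
--     Input:  [header_row, giant_multiline_row]
--     Output: [header_row, row1, row2, ...]
--     """
--     header   = table_data[0]
--     data_row = table_data[1]
--     cols     = [str(c).split("\n") if c else [] for c in data_row]
--     max_rows = max((len(c) for c in cols), default=0)
--     cols     = [c + [""] * (max_rows - len(c)) for c in cols]
--     result   = [header]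
--     for i in range(max_rows):
--         result.append([c[i] if i < len(c) else "" for c in cols])
--     return result
-- ===== SOURCE B (Python) =====
-- def _expand_index_table(table_data):
--     """
--     Convert a 2-row pdfplumber index table (with multi-line cells) into
--     individual rows: one row per form entry.
--
--     Column-major construction: instead of computing max_rows and padding
--     every column, scatter each column's lines directly into output rows,
--     growing the row list on demand.
--     """
--     header = table_data[0]
--     data_row = table_data[1]
--     width = len(data_row)
--     rows = []
--     for j, c in enumerate(data_row):
--         parts = str(c).split("\n") if c else []
--         for i, p in enumerate(parts):
--             while len(rows) <= i:
--                 rows.append([""] * width)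
--             rows[i][j] = p
--     return [header] + rows
-- ===== Notes on version B (the rewrite author's own statement) =====
-- stated objective: alternative
-- what changed: A builds the table row-major (max-length scan, pad every column, then emit row i by indexing all columns); B builds it column-major in one pass, scattering each column's split lines into output rows that are grown on demand, with no max scan and no padding pass.
-- outside the precondition, e.g. on _expand_index_table([[None], ['a\nb']]): A returns [[None], ['a'], ['b']], B returns [[None], ['a'], ['b']]
import Mathlib
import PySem

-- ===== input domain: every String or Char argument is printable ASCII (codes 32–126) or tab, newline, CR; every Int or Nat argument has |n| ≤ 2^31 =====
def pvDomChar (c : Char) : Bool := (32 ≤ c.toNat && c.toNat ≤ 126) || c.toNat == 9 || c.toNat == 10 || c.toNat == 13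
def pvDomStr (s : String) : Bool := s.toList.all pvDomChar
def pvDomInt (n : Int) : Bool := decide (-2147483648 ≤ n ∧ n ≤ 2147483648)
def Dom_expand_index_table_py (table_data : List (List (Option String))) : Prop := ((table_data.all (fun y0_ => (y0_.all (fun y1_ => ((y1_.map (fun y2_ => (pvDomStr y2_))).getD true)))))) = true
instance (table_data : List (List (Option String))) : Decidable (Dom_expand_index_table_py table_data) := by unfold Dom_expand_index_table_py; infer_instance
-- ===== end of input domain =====

-- B rebuilds the table column-major (scatter into rows grown on demand) instead of A's
-- row-major max-scan + padding; equivalence is proved on Pre_ below.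

-- helper for port A: `str(c).split("\n") if c else []` (falsy cell = None or "")
def pvSplitCell (c : Option String) : List String :=
  match c with
  | some s => if s = "" then [] else (PySem.Str.split? s "\n").getD []
  | none => []

-- ===== PORT A =====
def expand_index_table_py (table_data : List (List (Option String))) : List (List String) :=
  match table_data with
  | header :: data_row :: _ =>
      let cols := data_row.map pvSplitCell
      let max_rows := cols.foldl (fun m c => max m c.length) 0
      let cols2 := cols.map (fun c => c ++ List.replicate (max_rows - c.length) "")
      (PySem.List.pyRange 0 (max_rows : Int) 1).foldl
        (fun res i => res ++ [cols2.map (fun c =>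
            if i < (c.length : Int) then (PySem.List.pyGet? c i).getD "" else "")])
        [header.map (fun o => o.getD "")]
  | _ => []  -- Python raises IndexError here; excluded by Pre_

-- ===== PORT B =====
-- helper for port B: the same `str(c).split("\n") if c else []` expression in Source B
def pvSplitCellB (c : Option String) : List String :=
  match c with
  | none => []
  | some s => if s = "" then [] else (PySem.Str.split? s "\n").getD []

-- `while len(rows) <= i: rows.append([""] * width)`
def pvGrow (rows : List (List String)) (i w : Nat) : List (List String) :=
  if rows.length ≤ i then pvGrow (rows ++ [List.replicate w ""]) i w else rows
termination_by i + 1 - rows.length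
decreasing_by simp_all; omega

def expand_index_table_py_alt (table_data : List (List (Option String))) : List (List String) :=
  match table_data with
  | [] => []        -- Python raises IndexError here; excluded by Pre_
  | [_] => []       -- Python raises IndexError here; excluded by Pre_
  | header :: data_row :: _ =>
      let width := data_row.length
      let rows := (PySem.List.enumerate data_row).foldl (fun rows jc =>
        (PySem.List.enumerate (pvSplitCellB jc.2)).foldl (fun rows ip =>
          let rows' := pvGrow rows ip.1.toNat width
          rows'.set ip.1.toNat ((rows'.getD ip.1.toNat []).set jc.1.toNat ip.2)) rows) []
      (header.map (fun o => o.getD "")) :: rows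

-- ===== PRECONDITION & SPEC =====
-- Pre_ excludes (a) tables with fewer than 2 rows, on which A raises IndexError, and
-- (b) tables whose header row contains None, on which A returns a row that is not a
-- list of strings (None is kept as-is, unrepresentable as List String).
def Pre_expand_index_table_py (table_data : List (List (Option String))) : Prop :=
  2 ≤ table_data.length ∧ ∀ o ∈ table_data.headD [], o.isSome = true
instance (table_data : List (List (Option String))) : Decidable (Pre_expand_index_table_py table_data) := by unfold Pre_expand_index_table_py; infer_instance

def pvWitness_expand_index_table_py : List (List (Option String)) :=
  [[some "Form", some "Name"], [some "1\n2", some "a\nb"]]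

def Spec_expand_index_table_py (table_data : List (List (Option String))) (out : List (List String)) : Prop := out = expand_index_table_py_alt table_data
instance (table_data : List (List (Option String))) (out : List (List String)) : Decidable (Spec_expand_index_table_py table_data out) := by unfold Spec_expand_index_table_py; infer_instance

-- ===== CLAIM (what is proved, stated in full; the proofs are below) =====
def Claim_equal_expand_index_table_py : Prop := ∀ (table_data : List (List (Option String))), Dom_expand_index_table_py table_data → Pre_expand_index_table_py table_data → Spec_expand_index_table_py table_data (expand_index_table_py table_data)

-- ===== LEMMAS AND PROOFS =====

def pvMxl (cols : List (List String)) : Nat := cols.foldl (fun m c => max m c.length) 0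

theorem pvMxl_acc (cols : List (List String)) (a : Nat) :
    cols.foldl (fun m c => max m c.length) a = max a (pvMxl cols) := by
  induction cols generalizing a with
  | nil => simp [pvMxl]
  | cons c cs ih =>
    simp only [pvMxl, List.foldl_cons] at *
    rw [ih (max a c.length), ih (max 0 c.length)]
    omega

theorem pvMxl_append_singleton (cols : List (List String)) (c : List String) :
    pvMxl (cols ++ [c]) = max (pvMxl cols) c.length := by
  show (cols ++ [c]).foldl (fun m c => max m c.length) 0 = _
  rw [List.foldl_append]
  simp only [List.foldl_cons, List.foldl_nil]
  rw [pvMxl_acc]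
  show max _ (pvMxl [c]) = _
  simp [pvMxl]

theorem pvLen_le_mxl (cols : List (List String)) (c : List String) (h : c ∈ cols) :
    c.length ≤ pvMxl cols := by
  induction cols with
  | nil => simp at h
  | cons x xs ih =>
    show _ ≤ (x :: xs).foldl (fun m c => max m c.length) 0
    simp only [List.foldl_cons]
    rw [pvMxl_acc]
    rcases List.mem_cons.mp h with h | h
    · subst h; omega
    · have := ih h; omega

def pvGrid (L : List (List String)) (n : Nat) : List (List String) :=
  (List.range n).map (fun i => L.map (fun c => c.getD i ""))

theorem pvGetD_of_le (c : List String) (n : Nat) (h : c.length ≤ n) : c.getD n "" = "" := by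
  simp [List.getD, List.getElem?_eq_none h]

theorem pvGrid_succ (L : List (List String)) (n : Nat) :
    pvGrid L (n + 1) = pvGrid L n ++ [L.map (fun c => c.getD n "")] := by
  simp [pvGrid, List.range_succ]

theorem pvGrow_grid (L : List (List String)) (i w : Nat) : ∀ (n : Nat),
    w = L.length → (∀ c ∈ L, c.length ≤ n) →
    pvGrow (pvGrid L n) i w = pvGrid L (max n (i + 1)) := by
  intro n
  induction hk : i + 1 - n using Nat.strong_induction_on generalizing n with
  | _ k ih =>
  intro hw hlen
  rw [pvGrow]
  simp only [pvGrid, List.length_map, List.length_range]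
  by_cases hni : n ≤ i
  · simp only [if_pos hni]
    have hrow : List.replicate w "" = L.map (fun c => c.getD n "") := by
      subst hw
      symm
      rw [List.eq_replicate_iff]
      refine ⟨by simp, ?_⟩
      intro b hb
      rcases List.mem_map.mp hb with ⟨c, hc, rfl⟩
      exact pvGetD_of_le c n (hlen c hc)
    rw [hrow, show (List.range n).map (fun i => L.map (fun c => c.getD i "")) = pvGrid L n from rfl,
        ← pvGrid_succ]
    cases k with
    | zero => omega
    | succ k' =>
      rw [ih k' (by omega) (n+1) (by omega) hw (fun c hc => Nat.le_succ_of_le (hlen c hc))]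
      congr 1
      omega
  · simp only [if_neg hni]
    have : max n (i+1) = n := by omega
    rw [this]

theorem pvSet_grid (done R : List (List String)) (pre : List String) (x : String) (m : Nat)
    (hm : pre.length < m) :
    (pvGrid (done ++ pre :: R) m).set pre.length
      (((pvGrid (done ++ pre :: R) m).getD pre.length []).set done.length x)
      = pvGrid (done ++ (pre ++ [x]) :: R) m := by
  have hrow : (pvGrid (done ++ pre :: R) m).getD pre.length []
      = (done ++ pre :: R).map (fun c => c.getD pre.length "") := by
    simp [pvGrid, List.getD, List.getElem?_map, List.getElem?_range hm]
  rw [hrow]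
  apply List.ext_getElem
  · simp [pvGrid]
  · intro i h1 h2
    simp only [pvGrid, List.getElem_set, List.getElem_map, List.getElem_range] at *
    by_cases hi : pre.length = i
    · subst hi
      simp only [List.map_append, List.map_cons]
      rw [List.set_append_right _ _ (by simp)]
      simp only [List.length_map, Nat.sub_self, List.set_cons_zero, if_true]
      congr 2
      rw [List.getD, List.getElem?_append_right (Nat.le_refl _)]
      simp
    · simp only [if_neg hi]
      simp only [List.map_append, List.map_cons]
      congr 2
      rcases Nat.lt_or_ge i pre.length with hlt | hge
      · rw [List.getD, List.getD, List.getElem?_append_left hlt]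
      · have hgt : pre.length < i := by omega
        rw [pvGetD_of_le pre i (by omega), pvGetD_of_le (pre ++ [x]) i (by simp; omega)]

theorem pvInner (done : List (List String)) (k : Nat) (w : Nat)
    (hw : w = done.length + 1 + k) (cs : List String) : ∀ (pre : List String),
    (PySem.List.enumerate cs (pre.length : Int)).foldl (fun rows ip =>
        let rows' := pvGrow rows ip.1.toNat w
        rows'.set ip.1.toNat ((rows'.getD ip.1.toNat []).set done.length ip.2))
      (pvGrid (done ++ pre :: List.replicate k []) (max (pvMxl done) pre.length))
    = pvGrid (done ++ (pre ++ cs) :: List.replicate k [])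
        (max (pvMxl done) (pre ++ cs).length) := by
  induction cs with
  | nil => intro pre; simp [PySem.List.enumerate]
  | cons p ps ih =>
    intro pre
    rw [PySem.List.enumerate_cons, List.foldl_cons]
    have hgrow : pvGrow (pvGrid (done ++ pre :: List.replicate k [])
        (max (pvMxl done) pre.length)) pre.length w
        = pvGrid (done ++ pre :: List.replicate k [])
            (max (pvMxl done) (pre.length + 1)) := by
      rw [pvGrow_grid]
      · congr 1; omega
      · simp [hw]; omega
      · intro c hc
        rcases List.mem_append.mp hc with h | h
        · exact le_trans (pvLen_le_mxl done c h) (le_max_left _ _)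
        · rcases List.mem_cons.mp h with h | h
          · subst h; omega
          · rw [List.eq_of_mem_replicate h]; simp
    simp only [Int.toNat_natCast, hgrow]
    rw [pvSet_grid done _ pre p _ (by omega)]
    have hcast : (pre.length : Int) + 1 = (((pre ++ [p]).length : Nat) : Int) := by
      simp
    rw [hcast]
    have := ih (pre ++ [p])
    simp only [List.length_append, List.length_cons, List.length_nil] at this ⊢
    rw [show max (pvMxl done) (pre.length + 1) = max (pvMxl done) (pre.length + 1) from rfl]
    convert this using 3 <;> first
      | (simp; omega)
      | simp

theorem pvOuter (w : Nat) (rest : List (Option String)) : ∀ (done : List (List String)),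
    w = done.length + rest.length →
    (PySem.List.enumerate rest (done.length : Int)).foldl (fun rows jc =>
        (PySem.List.enumerate (pvSplitCell jc.2)).foldl (fun rows ip =>
          let rows' := pvGrow rows ip.1.toNat w
          rows'.set ip.1.toNat ((rows'.getD ip.1.toNat []).set jc.1.toNat ip.2)) rows)
      (pvGrid (done ++ List.replicate rest.length []) (pvMxl done))
    = pvGrid (done ++ rest.map pvSplitCell) (pvMxl (done ++ rest.map pvSplitCell)) := by
  induction rest with
  | nil => intro done hw; simp [PySem.List.enumerate]
  | cons c rest' ih =>
    intro done hw
    rw [PySem.List.enumerate_cons, List.foldl_cons]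
    have hinner := pvInner done rest'.length w
      (by simp at hw; omega) (pvSplitCell c) []
    simp only [List.length_nil, Nat.cast_zero, List.nil_append, Nat.max_zero] at hinner
    simp only [Int.toNat_natCast, List.length_cons, List.replicate_succ]
    rw [hinner]
    have hcast : (done.length : Int) + 1 = (((done ++ [pvSplitCell c]).length : Nat) : Int) := by
      simp
    rw [hcast]
    have := ih (done ++ [pvSplitCell c]) (by simp at hw ⊢; omega)
    rw [pvMxl_append_singleton] at this
    simp only [List.append_assoc, List.singleton_append, List.map_cons] at this ⊢
    exact this

theorem pvPad_getD (c : List String) (m i : Nat) :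
    (c ++ List.replicate m "").getD i "" = c.getD i "" := by
  rcases Nat.lt_or_ge i c.length with h | h
  · rw [List.getD, List.getD, List.getElem?_append_left h]
  · rw [pvGetD_of_le c i h]
    rcases Nat.lt_or_ge i (c.length + m) with h2 | h2
    · rw [List.getD, List.getElem?_append_right h, List.getElem?_replicate]
      rw [if_pos (by omega)]
      rfl
    · exact pvGetD_of_le _ i (by simp; omega)

theorem pvA_rows (hd : List String) (cols : List (List String)) :
    (PySem.List.pyRange 0 ((pvMxl cols : Nat) : Int) 1).foldl
        (fun res i => res ++ [(cols.map (fun c => c ++ List.replicate (pvMxl cols - c.length) "")).map (fun c =>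
            if i < (c.length : Int) then (PySem.List.pyGet? c i).getD "" else "")])
        [hd]
    = hd :: pvGrid cols (pvMxl cols) := by
  rw [PySem.List.foldl_append_singleton_eq_map, PySem.List.pyRange_zero_nat, List.map_map,
      List.singleton_append]
  congr 1
  unfold pvGrid
  apply List.map_congr_left
  intro i hi
  have hiM : i < pvMxl cols := List.mem_range.mp hi
  simp only [Function.comp, List.map_map]
  apply List.map_congr_left
  intro c _
  simp only [Function.comp, List.length_append, List.length_replicate]
  rw [if_pos (by push_cast; omega), PySem.List.pyGet?_natCast]
  show (c ++ List.replicate (pvMxl cols - c.length) "").getD i "" = c.getD i ""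
  exact pvPad_getD _ _ _

theorem pvSplitCellB_eq : pvSplitCellB = pvSplitCell := by
  funext c
  cases c <;> rfl

theorem pvMain_eq (t : List (List (Option String))) :
    expand_index_table_py t = expand_index_table_py_alt t := by
  rcases t with _ | ⟨h, _ | ⟨d, r⟩⟩
  · rfl
  · rfl
  · show (PySem.List.pyRange 0 ((pvMxl (d.map pvSplitCell) : Nat) : Int) 1).foldl _ _ = _
    simp only [show List.foldl (fun (m : Nat) (c : List String) => max m c.length) 0
        (d.map pvSplitCell) = pvMxl (d.map pvSplitCell) from rfl]
    rw [pvA_rows]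
    have houter := pvOuter d.length d []
      (by simp) 
    simp only [List.length_nil, Nat.cast_zero, List.nil_append] at houter
    show _ = (h.map (fun o => o.getD "")) ::
      (PySem.List.enumerate d 0).foldl _ []
    congr 1
    rw [← houter, pvSplitCellB_eq]
    rfl

-- ===== VERDICT (by name: the statement is the Claim_ definition above) =====
theorem expand_index_table_py_spec : Claim_equal_expand_index_table_py := by
  intro t _ _
  show expand_index_table_py t = expand_index_table_py_alt t
  exact pvMain_eq t
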